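-- pv_equiv track=rewrite | github.com/ECuteri/noi-energia-chatbot-clean | routes/chatwoot_webhook.py | _mask_sensitive_value
-- ===== SOURCE A (Python) =====
-- from typing import Any, Dict
--
-- def _mask_sensitive_value(value: Any) -> str:
--     if not isinstance(value, str):
--         return str(value)
--     val = value
--     if value.lower().startswith("bearer "):
--         token_part = value.split(" ", 1)[1]
--         return "Bearer " + _mask_sensitive_value(token_part)
--     if len(val) <= 8:
--         return "*" * len(val)
--     return f"{val[:4]}...{val[-4:]}"
-- ===== SOURCE B (Python) =====
-- from typing import Any
--
-- def _mask_sensitive_value(value: Any) -> str: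
--     if not isinstance(value, str):
--         return str(value)
--     rest = value
--     n = 0
--     while rest.lower().startswith("bearer "):
--         # a case-insensitive "bearer " prefix puts the first space at index 6,
--         # so split(" ", 1)[1] is exactly rest[7:]
--         rest = rest[7:]
--         n += 1
--     if len(rest) <= 8:
--         core = "*" * len(rest)
--     else:
--         core = rest[:4] + "..." + rest[-4:]
--     return "Bearer " * n + core
-- ===== Notes on version B (the rewrite author's own statement) =====
-- stated objective: simpler
-- what changed: Replaces A's self-recursion (re-splitting on the first space at every level and concatenating prefixes on the way out) with a single while loop that counts and strips 'Bearer ' prefixes by a fixed 7-character drop, applies the base mask once, and prepends the counted prefixes.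
import Mathlib
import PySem

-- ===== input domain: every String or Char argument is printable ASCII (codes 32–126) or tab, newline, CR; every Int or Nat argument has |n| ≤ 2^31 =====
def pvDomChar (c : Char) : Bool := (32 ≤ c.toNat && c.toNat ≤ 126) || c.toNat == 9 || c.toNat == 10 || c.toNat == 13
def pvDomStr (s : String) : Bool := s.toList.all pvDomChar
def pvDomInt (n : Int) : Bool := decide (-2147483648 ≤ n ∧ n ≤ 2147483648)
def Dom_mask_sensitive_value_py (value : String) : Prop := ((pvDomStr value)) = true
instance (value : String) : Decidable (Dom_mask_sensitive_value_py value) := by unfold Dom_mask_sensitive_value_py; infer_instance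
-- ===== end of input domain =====

-- B replaces A's recursive "Bearer "-stripping with a counting while-loop plus a single
-- base mask (objective: simpler/iterative decomposition; same cost).
-- The Lean argument is a String, so Python's non-str branch is outside the ported domain.

-- ===== PORT A =====
-- A's self-recursion is ported with a fuel counter; fuel = length + 1 always suffices
-- because each recursive call passes a string at least 7 characters shorter.
def maskRecA (fuel : Nat) (cs : List Char) : List Char :=
  match fuel with
  | 0 => []   -- unreachable for fuel > cs.length
  | fuel + 1 =>
    if PySem.Chars.startswith (PySem.Chars.lower cs) "bearer ".toList then
      -- token_part = value.split(" ", 1)[1]  (the index 1 always exists under the guard)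
      "Bearer ".toList ++
        maskRecA fuel (PySem.List.pyGetD ((PySem.Chars.splitMax? cs " ".toList 1).getD []) 1 [])
    else if cs.length ≤ 8 then
      List.replicate cs.length '*'
    else
      PySem.List.slice cs none (some 4) ++ "...".toList ++ PySem.List.slice cs (some (-4)) none

def mask_sensitive_value_py (value : String) : String :=
  String.ofList (maskRecA (value.toList.length + 1) value.toList)

-- ===== PORT B =====
def maskCoreB (cs : List Char) : List Char :=
  if cs.length ≤ 8 then
    List.replicate cs.length '*'
  else
    PySem.List.slice cs none (some 4) ++ "...".toList ++ PySem.List.slice cs (some (-4)) none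

-- the while loop of B, ported with a fuel counter (fuel = length + 1 suffices:
-- each iteration drops 7 characters)
def stripLoopB (fuel : Nat) (n : Nat) (rest : List Char) : Nat × List Char :=
  match fuel with
  | 0 => (n, rest)   -- unreachable for fuel > rest.length
  | fuel + 1 =>
    if PySem.Chars.startswith (PySem.Chars.lower rest) "bearer ".toList then
      stripLoopB fuel (n + 1) (PySem.List.slice rest (some 7) none)
    else
      (n, rest)

def mask_sensitive_value_py_alt (value : String) : String :=
  let p := stripLoopB (value.toList.length + 1) 0 value.toList
  String.ofList ((List.replicate p.1 "Bearer ".toList).flatten ++ maskCoreB p.2)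

-- ===== PRECONDITION & SPEC =====
def Spec_mask_sensitive_value_py (value : String) (out : String) : Prop := out = mask_sensitive_value_py_alt value
instance (value : String) (out : String) : Decidable (Spec_mask_sensitive_value_py value out) := by unfold Spec_mask_sensitive_value_py; infer_instance

-- ===== CLAIM (what is proved, stated in full; the proofs are below) =====
def Claim_equal_mask_sensitive_value_py : Prop := ∀ (value : String), Dom_mask_sensitive_value_py value → Spec_mask_sensitive_value_py value (mask_sensitive_value_py value)

-- ===== LEMMAS AND PROOFS =====

theorem upper_lower_ne_space (c : Char) (hu : PySem.Chars.isupper c = true) :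
    PySem.Chars.lowerChar c ≠ ' ' := by
  have hu' := hu
  simp [PySem.Chars.isupper] at hu'
  obtain ⟨h1, h2⟩ := hu'
  have hA : 65 ≤ c.toNat := Nat.succ_le_of_lt h1
  have hZ : c.toNat ≤ 90 := h2
  intro h
  rw [PySem.Chars.lowerChar, if_pos hu] at h
  have ht := congrArg Char.toNat h
  rw [Char.toNat_ofNat, if_pos (Or.inl (by omega))] at ht
  have hsp : (' ').toNat = 32 := rfl
  rw [hsp] at ht
  omega

theorem lowerChar_eq_space (c : Char) (h : PySem.Chars.lowerChar c = ' ') : c = ' ' := by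
  by_cases hu : PySem.Chars.isupper c = true
  · exact absurd h (upper_lower_ne_space c hu)
  · rwa [PySem.Chars.lowerChar, if_neg hu] at h

theorem lowerChar_ne_of_space {c x : Char} (hx : x ≠ ' ')
    (h : x = PySem.Chars.lowerChar c) : c ≠ ' ' := by
  intro hc; subst hc
  exact hx (h.trans (by decide))

-- shape of a string with a case-insensitive "bearer " prefix:
-- six non-space characters, then a space, then the token
theorem bearer_split (cs : List Char)
    (h : PySem.Chars.startswith (PySem.Chars.lower cs) "bearer ".toList = true) :
    ∃ u v, cs = u ++ ' ' :: v ∧ u.length = 6 ∧ ∀ c ∈ u, c ≠ ' ' := by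
  match cs with
  | [] => simp [PySem.Chars.startswith, PySem.Chars.lower] at h
  | [c0] => simp [PySem.Chars.startswith, PySem.Chars.lower] at h
  | [c0, c1] => simp [PySem.Chars.startswith, PySem.Chars.lower] at h
  | [c0, c1, c2] => simp [PySem.Chars.startswith, PySem.Chars.lower] at h
  | [c0, c1, c2, c3] => simp [PySem.Chars.startswith, PySem.Chars.lower] at h
  | [c0, c1, c2, c3, c4] => simp [PySem.Chars.startswith, PySem.Chars.lower] at h
  | [c0, c1, c2, c3, c4, c5] => simp [PySem.Chars.startswith, PySem.Chars.lower] at h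
  | c0 :: c1 :: c2 :: c3 :: c4 :: c5 :: c6 :: v =>
    simp [PySem.Chars.startswith, PySem.Chars.lower,
      show "bearer ".toList = ['b','e','a','r','e','r',' '] from rfl] at h
    obtain ⟨h0, h1, h2, h3, h4, h5, h6⟩ := h
    refine ⟨[c0, c1, c2, c3, c4, c5], v, ?_, rfl, ?_⟩
    · simp [lowerChar_eq_space c6 h6.symm]
    · intro c hc
      simp at hc
      rcases hc with rfl | rfl | rfl | rfl | rfl | rfl
      · exact lowerChar_ne_of_space (by decide) h0
      · exact lowerChar_ne_of_space (by decide) h1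
      · exact lowerChar_ne_of_space (by decide) h2
      · exact lowerChar_ne_of_space (by decide) h3
      · exact lowerChar_ne_of_space (by decide) h4
      · exact lowerChar_ne_of_space (by decide) h5

theorem go_zero (fuel : Nat) (l : List Char) (acc : List (List Char)) :
    PySem.Chars.splitOnMax.go [' '] fuel 0 l [] acc = (l :: acc).reverse := by
  cases fuel with
  | zero => simp [PySem.Chars.splitOnMax.go]
  | succ f => cases l <;> simp [PySem.Chars.splitOnMax.go]

theorem go_one (u : List Char) (hu : ∀ c ∈ u, c ≠ ' ') :
    ∀ (fuel : Nat), u.length < fuel → ∀ (v : List Char) (cur : List Char) (acc : List (List Char)),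
    PySem.Chars.splitOnMax.go [' '] fuel 1 (u ++ ' ' :: v) cur acc
      = acc.reverse ++ [cur.reverse ++ u, v] := by
  induction u with
  | nil =>
    intro fuel hf v cur acc
    match fuel, hf with
    | f + 1, _ =>
      simp [PySem.Chars.splitOnMax.go, List.isPrefixOf, go_zero]
  | cons c u ih =>
    intro fuel hf v cur acc
    match fuel, hf with
    | f + 1, hf =>
      have hc : c ≠ ' ' := hu c (by simp)
      have : PySem.Chars.splitOnMax.go [' '] (f + 1) 1 ((c :: u) ++ ' ' :: v) cur acc
          = PySem.Chars.splitOnMax.go [' '] f 1 (u ++ ' ' :: v) (c :: cur) acc := by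
        simp [PySem.Chars.splitOnMax.go, List.isPrefixOf, (by simpa using hc.symm : ¬ (' ' = c))]
      rw [this, ih (fun x hx => hu x (by simp [hx])) f (by simpa using Nat.lt_of_succ_lt_succ hf) v (c :: cur) acc]
      simp

-- the recursion argument of A is exactly the 7-character drop of B
theorem token_part_eq (cs : List Char)
    (h : PySem.Chars.startswith (PySem.Chars.lower cs) "bearer ".toList = true) :
    PySem.List.pyGetD ((PySem.Chars.splitMax? cs " ".toList 1).getD []) 1 []
      = cs.drop 7 := by
  obtain ⟨u, v, rfl, hlen, hus⟩ := bearer_split cs h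
  have h1 : PySem.Chars.splitMax? (u ++ ' ' :: v) " ".toList 1
      = some (PySem.Chars.splitOnMax (u ++ ' ' :: v) [' '] 1) := by
    simp [PySem.Chars.splitMax?]
  rw [h1]
  have h2 : PySem.Chars.splitOnMax (u ++ ' ' :: v) [' '] 1
      = PySem.Chars.splitOnMax.go [' '] ((u ++ ' ' :: v).length + 1) 1 (u ++ ' ' :: v) [] [] := by
    simp [PySem.Chars.splitOnMax]
  rw [h2, go_one u hus _ (by simp) v [] []]
  have h3 : (u ++ ' ' :: v).drop 7 = v := by
    have : 7 = u.length + 1 := by omega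
    rw [this, ← List.drop_drop]
    simp
  simp [h3, PySem.List.pyGetD]

theorem slice_seven (cs : List Char) :
    PySem.List.slice cs (some 7) none = cs.drop 7 := by
  have h7 : ((7 : Int)).toNat = 7 := by decide
  rw [PySem.List.slice_from cs (by norm_num), h7]

theorem strip_acc (fuel : Nat) : ∀ (n : Nat) (cs : List Char),
    stripLoopB fuel n cs = ((stripLoopB fuel 0 cs).1 + n, (stripLoopB fuel 0 cs).2) := by
  induction fuel with
  | zero => intro n cs; simp [stripLoopB]
  | succ f ih =>
    intro n cs
    simp only [stripLoopB]
    by_cases h : PySem.Chars.startswith (PySem.Chars.lower cs) "bearer ".toList = true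
    · rw [if_pos h, if_pos h, ih (n + 1), ih 1]
      simp only [Prod.mk.injEq]
      exact ⟨by omega, trivial⟩
    · rw [if_neg h, if_neg h]
      simp

theorem bearer_len_ge (cs : List Char)
    (h : PySem.Chars.startswith (PySem.Chars.lower cs) "bearer ".toList = true) :
    7 ≤ cs.length := by
  obtain ⟨u, v, rfl, hlen, -⟩ := bearer_split cs h
  simp [hlen]
  omega

theorem main_eq : ∀ (N : Nat) (cs : List Char), cs.length ≤ N →
    ∀ (f1 f2 : Nat), cs.length < f1 → cs.length < f2 →
    maskRecA f1 cs
      = (List.replicate (stripLoopB f2 0 cs).1 "Bearer ".toList).flatten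
        ++ maskCoreB (stripLoopB f2 0 cs).2 := by
  intro N
  induction N with
  | zero =>
    intro cs hN f1 f2 h1 h2
    match f1, h1, f2, h2 with
    | g1 + 1, _, g2 + 1, _ =>
      have hnil : cs = [] := List.eq_nil_of_length_eq_zero (by omega)
      subst hnil
      have hs : PySem.Chars.startswith (PySem.Chars.lower []) "bearer ".toList = false := by decide
      simp only [maskRecA, stripLoopB, hs]
      simp [maskCoreB]
  | succ N ih =>
    intro cs hN f1 f2 h1 h2
    match f1, h1, f2, h2 with
    | g1 + 1, h1, g2 + 1, h2 =>
      by_cases hb : PySem.Chars.startswith (PySem.Chars.lower cs) "bearer ".toList = true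
      · have h7 := bearer_len_ge cs hb
        have hA : maskRecA (g1 + 1) cs = "Bearer ".toList ++ maskRecA g1 (cs.drop 7) := by
          simp only [maskRecA, hb, if_pos, token_part_eq cs hb]
        have hB : stripLoopB (g2 + 1) 0 cs = stripLoopB g2 1 (cs.drop 7) := by
          simp only [stripLoopB, hb, if_pos, slice_seven]
        have hd : (cs.drop 7).length = cs.length - 7 := by simp
        rw [hA, hB, strip_acc g2 1 (cs.drop 7),
          ih (cs.drop 7) (by omega) g1 g2 (by omega) (by omega)]
        simp [List.replicate_succ]
      · rw [Bool.not_eq_true] at hb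
        simp only [maskRecA, stripLoopB, hb]
        simp [maskCoreB]

-- ===== VERDICT (by name: the statement is the Claim_ definition above) =====
theorem mask_sensitive_value_py_spec : Claim_equal_mask_sensitive_value_py := by
  intro value _
  unfold Spec_mask_sensitive_value_py mask_sensitive_value_py mask_sensitive_value_py_alt
  exact congrArg String.ofList
    (main_eq value.toList.length value.toList le_rfl _ _ (Nat.lt_succ_self _) (Nat.lt_succ_self _))
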